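-- pv_equiv track=rewrite | github.com/suzuki-akira3/token | mytokenizer/mytokenizer.py | splitbyblacket2
-- ===== SOURCE A (Python) =====
-- def splitbyblacket2(dicbl):
--     tokenlist = []
--     text = list(dicbl.values())[0]
--     blacs = '\u0028\u005B\u003C\u2039\u27E8\u3008'  # ( [  #〈 Left-Pointing Angle Bracket →003C(<) →2039(‹) →27E8(⟨) ≡3008(〈)
--     blace = '\u005D\u0029\u003E\u203A\u27E9\u3009'  # ) ]  # 〉Right-Pointing Angle Bracket →003E(>) →203A(›) →27E9(⟩) ≡3009(〉)
--     blac = blacs + blace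
--
--     lists = []
--     index = []
--     tx = []
--     for i, t in enumerate(text):
--         if t in blacs:
--             tokenlist += [{'BL1': t}]
--             index += [i]
--         elif t in blace:
--             tokenlist += [{'BL2': t}]
--             index += [i]
--         else:
--             tx += t
--             if i < len(text) - 1:
--                 if text[i + 1] in blac:
--                     tokenlist += [{'TK': ''.join(tx)}]
--                     tx = ''
--             else:
--                 tokenlist += [{'TK': ''.join(tx)}]
--     return tokenlist
-- ===== SOURCE B (Python) =====
-- def splitbyblacket2(dicbl):
--     text = next(iter(dicbl.values()))
--     blacs = '\u0028\u005B\u003C\u2039\u27E8\u3008'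
--     blace = '\u005D\u0029\u003E\u203A\u27E9\u3009'
--     blac = blacs + blace
--     out = []
--     i, n = 0, len(text)
--     while i < n:
--         c = text[i]
--         if c in blac:
--             out.append({'BL1': c} if c in blacs else {'BL2': c})
--             i += 1
--         else:
--             j = i
--             while j < n and text[j] not in blac:
--                 j += 1
--             out.append({'TK': text[i:j]})
--             i = j
--     return out
-- ===== Notes on version B (the rewrite author's own statement) =====
-- stated objective: simpler
-- what changed: Replaces A's single enumerate pass with a character accumulator and an index lookahead (text[i+1]) by a run-scanning two-level loop: the outer loop emits one BL1/BL2 token per bracket char, the inner scan takes a whole maximal non-bracket run as one TK slice; no accumulator, no lookahead, no unused locals.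
import Mathlib
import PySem

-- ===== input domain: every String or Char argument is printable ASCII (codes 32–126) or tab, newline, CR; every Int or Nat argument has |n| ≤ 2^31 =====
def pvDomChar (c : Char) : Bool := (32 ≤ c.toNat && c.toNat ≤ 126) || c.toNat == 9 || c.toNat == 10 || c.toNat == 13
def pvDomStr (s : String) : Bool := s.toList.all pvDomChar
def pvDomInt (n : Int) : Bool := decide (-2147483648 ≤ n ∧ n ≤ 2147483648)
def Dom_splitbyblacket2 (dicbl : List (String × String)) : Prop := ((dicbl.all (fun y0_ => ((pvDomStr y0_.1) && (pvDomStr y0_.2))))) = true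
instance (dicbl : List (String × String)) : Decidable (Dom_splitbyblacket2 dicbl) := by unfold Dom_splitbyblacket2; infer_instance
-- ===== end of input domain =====

-- B replaces A's per-character lookahead-and-accumulator pass by a run-scanning
-- two-level loop (inner scan takes one maximal non-bracket run); objective: simpler.

-- ===== PORT A =====

-- blacs / blace / blac of the Python source
def pvBlacs : List Char := ['\u0028', '\u005B', '\u003C', '\u2039', '\u27E8', '\u3008']
def pvBlace : List Char := ['\u005D', '\u0029', '\u003E', '\u203A', '\u27E9', '\u3009']
def pvBlac : List Char := pvBlacs ++ pvBlace

-- the 'for i, t in enumerate(text)' loop of A, carrying (tokenlist, tx)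
def pvLoopA (text : List Char) (i : Int) (cur : List Char)
    (tl : List (List (String × String))) (tx : List Char) :
    List (List (String × String)) × List Char :=
  match cur with
  | [] => (tl, tx)
  | t :: rest =>
    if t ∈ pvBlacs then
      pvLoopA text (i + 1) rest (tl ++ [[("BL1", String.ofList [t])]]) tx
    else if t ∈ pvBlace then
      pvLoopA text (i + 1) rest (tl ++ [[("BL2", String.ofList [t])]]) tx
    else
      let tx' := tx ++ [t]
      if i < (text.length : Int) - 1 then
        if (PySem.List.pyGet? text (i + 1)).getD ' ' ∈ pvBlac then
          pvLoopA text (i + 1) rest (tl ++ [[("TK", String.ofList tx')]]) []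
        else
          pvLoopA text (i + 1) rest tl tx'
      else
        pvLoopA text (i + 1) rest (tl ++ [[("TK", String.ofList tx')]]) tx'

def splitbyblacket2 (dicbl : List (String × String)) : List (List (String × String)) :=
  match dicbl with
  | [] => []  -- Python raises IndexError here (list(dicbl.values())[0]); excluded by Pre_
  | (_, text) :: _ => (pvLoopA text.toList 0 text.toList [] []).1

-- ===== PORT B =====

-- Source B's outer while loop; the inner 'while j < n and text[j] not in blac' run scan
-- is the takeWhile/dropWhile pair
def pvGoB (cs : List Char) : List (List (String × String)) :=
  match cs with
  | [] => []
  | c :: rest =>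
    if c ∈ pvBlac then
      (if c ∈ pvBlacs then [("BL1", String.ofList [c])] else [("BL2", String.ofList [c])]) :: pvGoB rest
    else
      [("TK", String.ofList (c :: rest.takeWhile (fun x => x ∉ pvBlac)))] ::
        pvGoB (rest.dropWhile (fun x => x ∉ pvBlac))
termination_by cs.length
decreasing_by
  · simp
  · have := List.length_dropWhile_le (fun x => decide (x ∉ pvBlac)) rest
    simp at this ⊢; omega

def splitbyblacket2_alt (dicbl : List (String × String)) : List (List (String × String)) :=
  match dicbl with
  | [] => []  -- next(iter(...)) raises StopIteration here; excluded by Pre_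
  | (_, text) :: _ => pvGoB text.toList

-- ===== PRECONDITION & SPEC =====
-- Pre_ excludes exactly the empty dict, on which A raises IndexError (B raises StopIteration).
def Pre_splitbyblacket2 (dicbl : List (String × String)) : Prop := dicbl ≠ []
instance (dicbl : List (String × String)) : Decidable (Pre_splitbyblacket2 dicbl) := by
  unfold Pre_splitbyblacket2; infer_instance

def pvWitness_splitbyblacket2 : (List (String × String)) := [("text", "ab(cd)<e>")]

def Spec_splitbyblacket2 (dicbl : List (String × String)) (out : List (List (String × String))) : Prop := out = splitbyblacket2_alt dicbl
instance (dicbl : List (String × String)) (out : List (List (String × String))) : Decidable (Spec_splitbyblacket2 dicbl out) := by unfold Spec_splitbyblacket2; infer_instance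

-- ===== CLAIM (what is proved, stated in full; the proofs are below) =====
def Claim_equal_splitbyblacket2 : Prop := ∀ (dicbl : List (String × String)), Dom_splitbyblacket2 dicbl → Pre_splitbyblacket2 dicbl → Spec_splitbyblacket2 dicbl (splitbyblacket2 dicbl)

-- ===== LEMMAS AND PROOFS =====

-- A's result as a function of the remaining suffix and the accumulator tx
def pvG (tx : List Char) (cs : List Char) : List (List (String × String)) :=
  match cs with
  | [] => []
  | t :: rest =>
    if t ∈ pvBlacs then [("BL1", String.ofList [t])] :: pvG tx rest
    else if t ∈ pvBlace then [("BL2", String.ofList [t])] :: pvG tx rest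
    else
      match rest with
      | [] => [[("TK", String.ofList (tx ++ [t]))]]
      | t' :: _ =>
        if t' ∈ pvBlac then [("TK", String.ofList (tx ++ [t]))] :: pvG [] rest
        else pvG (tx ++ [t]) rest

lemma pvLoopA_eq_pvG (text : List Char) :
    ∀ (cur : List Char) (i : Int) (tl : List (List (String × String))) (tx : List Char),
      0 ≤ i → text.drop i.toNat = cur →
      (pvLoopA text i cur tl tx).1 = tl ++ pvG tx cur := by
  intro cur
  induction cur with
  | nil => intro i tl tx _ _; simp [pvLoopA, pvG]
  | cons t rest ih =>
    intro i tl tx hi hdrop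
    have hlt : i.toNat < text.length := by
      by_contra h
      rw [List.drop_eq_nil_of_le (by omega)] at hdrop
      simp at hdrop
    have hdrop' : text.drop (i + 1).toNat = rest := by
      have : (i + 1).toNat = i.toNat + 1 := by omega
      rw [this, ← List.drop_drop, hdrop]; simp
    have hlen : rest.length + 1 + i.toNat = text.length := by
      have := congrArg List.length hdrop
      simp [List.length_drop] at this
      omega
    by_cases h1 : t ∈ pvBlacs
    · rw [pvLoopA, pvG.eq_def]
      simp only [h1, if_pos]
      rw [ih (i + 1) _ tx (by omega) hdrop']
      simp
    · by_cases h2 : t ∈ pvBlace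
      · rw [pvLoopA, pvG.eq_def]
        simp only [h1, h2, if_pos, if_false]
        rw [ih (i + 1) _ tx (by omega) hdrop']
        simp
      · rw [pvLoopA, pvG.eq_def]
        simp only [h1, h2, if_false]
        cases rest with
        | nil =>
          have : ¬ i < (text.length : Int) - 1 := by simp at hlen; omega
          simp only [this, if_false]
          rw [ih (i + 1) _ _ (by omega) hdrop']
          simp [pvG]
        | cons t' rest' =>
          have hcond : i < (text.length : Int) - 1 := by simp at hlen; omega
          have hget : (PySem.List.pyGet? text (i + 1)).getD ' ' = t' := by
            have h1' : i + 1 = ((i.toNat + 1 : Nat) : Int) := by omega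
            rw [h1', PySem.List.pyGet?_natCast]
            have : text[i.toNat + 1]? = (text.drop i.toNat)[1]? := by
              rw [List.getElem?_drop]
            rw [this, hdrop]
            simp
          simp only [hcond, if_pos, hget]
          by_cases h3 : t' ∈ pvBlac
          · simp only [h3, if_pos]
            rw [ih (i + 1) _ [] (by omega) hdrop']
            simp
          · simp only [h3, if_false]
            rw [ih (i + 1) _ _ (by omega) hdrop']

lemma pvG_eq_pvGoB_aux : ∀ (n : Nat) (cs : List Char), cs.length ≤ n →
    (∀ (tx : List Char) (t : Char) (rest : List Char), cs = t :: rest → t ∉ pvBlac →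
      pvG tx cs = [("TK", String.ofList (tx ++ t :: rest.takeWhile (fun x => x ∉ pvBlac)))] ::
        pvGoB (rest.dropWhile (fun x => x ∉ pvBlac))) ∧
    pvG [] cs = pvGoB cs := by
  intro n
  induction n with
  | zero =>
    intro cs hlen
    have : cs = [] := by cases cs <;> simp_all
    subst this
    exact ⟨by intro _ _ _ h; simp at h, by simp [pvG, pvGoB]⟩
  | succ n ih =>
    intro cs hlen
    cases cs with
    | nil => exact ⟨by intro _ _ _ h; simp at h, by simp [pvG, pvGoB]⟩
    | cons t rest =>
      have hrest : rest.length ≤ n := by simp at hlen; omega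
      have part2 : ∀ (tx : List Char) (t0 : Char) (rest0 : List Char),
          t :: rest = t0 :: rest0 → t0 ∉ pvBlac →
          pvG tx (t :: rest) = [("TK", String.ofList (tx ++ t0 :: rest0.takeWhile (fun x => x ∉ pvBlac)))] ::
            pvGoB (rest0.dropWhile (fun x => x ∉ pvBlac)) := by
        intro tx t0 rest0 heq hnot
        injection heq with e1 e2
        subst e1; subst e2
        have h1 : t ∉ pvBlacs := fun h => hnot (by simp [pvBlac, h])
        have h2 : t ∉ pvBlace := fun h => hnot (by simp [pvBlac, h])
        rw [pvG.eq_def]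
        simp only [h1, h2, if_false]
        cases rest with
        | nil => simp [pvGoB]
        | cons t' rest' =>
          by_cases h3 : t' ∈ pvBlac
          · simp only [h3, if_pos]
            rw [(ih (t' :: rest') hrest).2]
            simp [h3]
          · simp only [h3, if_false]
            rw [(ih (t' :: rest') hrest).1 (tx ++ [t]) t' rest' rfl h3]
            simp [h3]
      refine ⟨part2, ?_⟩
      by_cases h1 : t ∈ pvBlacs
      · have hb : t ∈ pvBlac := by simp [pvBlac, h1]
        rw [pvG.eq_def, pvGoB.eq_def]
        simp only [h1, hb, if_pos]
        rw [(ih rest hrest).2]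
      · by_cases h2 : t ∈ pvBlace
        · have hb : t ∈ pvBlac := by simp [pvBlac, h2]
          rw [pvG.eq_def, pvGoB.eq_def]
          simp only [h1, h2, hb, if_pos, if_false]
          rw [(ih rest hrest).2]
        · have hb : t ∉ pvBlac := by simp [pvBlac, h1, h2]
          rw [part2 [] t rest rfl hb, pvGoB]
          simp only [hb, if_false]
          simp

lemma pvG_eq_pvGoB (cs : List Char) : pvG [] cs = pvGoB cs :=
  (pvG_eq_pvGoB_aux cs.length cs le_rfl).2

-- ===== VERDICT (by name: the statement is the Claim_ definition above) =====
theorem splitbyblacket2_spec : Claim_equal_splitbyblacket2 := by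
  intro dicbl _ hpre
  unfold Spec_splitbyblacket2
  match dicbl with
  | [] => exact absurd rfl hpre
  | (k, text) :: rest =>
    show (pvLoopA text.toList 0 text.toList [] []).1 = pvGoB text.toList
    rw [pvLoopA_eq_pvG text.toList text.toList 0 [] [] le_rfl (by simp)]
    simp [pvG_eq_pvGoB]
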